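-- pv_equiv track=rewrite | github.com/UWCS/progcomps | 2223_t2/4/mark.py | parse_maybe_uwpl
-- ===== SOURCE A (Python) =====
-- import math
--
-- def parse_maybe_uwpl(script: list[str]) -> dict[str, int]:
--     vars = {}
--     stack = [1]
--     curr = 0
--     while curr < len(script):
--         if script[curr] == "}":
--             stack.pop()
--             if len(stack) == 0:
--                 return {}
--         elif script[curr].startswith("repeat "):
--             try:
--                 rep = int(script[curr][7:])
--             except ValueError:
--                 return {}
--             stack.append(rep)
--             curr += 1  # skip past opening {
--             if script[curr] != "{":
--                 return {}
--         elif script[curr][-2:] == "++":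
--             var_name = script[curr][:-2]
--             if var_name not in vars:
--                 vars[var_name] = 0
--             vars[var_name] += math.prod(stack)
--             if vars[var_name] > 1_000_000:
--                 return {}
--         else: # must be increment
--             return {}
--         curr += 1
--     return vars
-- ===== SOURCE B (Python) =====
-- def parse_maybe_uwpl(script: list[str]) -> dict[str, int]:
--     # One pass with a stack of cumulative products: the top is always the
--     # multiplier of the current block, so no product is ever recomputed.
--     counts = {}
--     prods = [1]
--     expect_brace = False
--     for line in script:
--         if expect_brace:
--             if line != "{":
--                 return {}
--             expect_brace = False
--         elif line == "}":
--             prods.pop()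
--             if not prods:
--                 return {}
--         elif line.startswith("repeat "):
--             try:
--                 rep = int(line[7:])
--             except ValueError:
--                 return {}
--             prods.append(prods[-1] * rep)
--             expect_brace = True
--         elif line.endswith("++"):
--             name = line[:-2]
--             v = counts.get(name, 0) + prods[-1]
--             counts[name] = v
--             if v > 1_000_000:
--                 return {}
--         else:
--             return {}
--     return counts
-- ===== Notes on version B (the rewrite author's own statement) =====
-- stated objective: alternative
-- what changed: B replaces A's index-driven while-loop that recomputes math.prod(stack) at every increment by a single for-pass that maintains a stack of cumulative products (top = current multiplier) and an expect-brace flag, doing constant work per line.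
-- outside the precondition, e.g. on parse_maybe_uwpl(['z', 'repeat 5']): A returns {}, B returns {}
import Mathlib
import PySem

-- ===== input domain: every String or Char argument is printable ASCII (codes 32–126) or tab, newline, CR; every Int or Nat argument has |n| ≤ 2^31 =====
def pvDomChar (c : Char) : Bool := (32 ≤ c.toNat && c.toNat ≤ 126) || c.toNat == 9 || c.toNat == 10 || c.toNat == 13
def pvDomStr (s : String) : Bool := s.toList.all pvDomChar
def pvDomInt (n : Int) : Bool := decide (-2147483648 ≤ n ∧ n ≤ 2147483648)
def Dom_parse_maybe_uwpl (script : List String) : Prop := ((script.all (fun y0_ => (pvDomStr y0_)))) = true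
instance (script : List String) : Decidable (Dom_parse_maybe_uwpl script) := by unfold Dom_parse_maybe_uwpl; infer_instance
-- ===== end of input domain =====

-- B: one pass keeping a stack of cumulative products (top = current multiplier) instead of
-- recomputing math.prod(stack) at every increment.


-- ===== PORT A =====
-- math.prod(stack)
def pvProd (l : List Int) : Int := l.foldl (· * ·) 1

-- A's while-loop; the Python stack's top is the HEAD of `stack` here (append = cons, pop = tail).
-- When `script[curr]` after a repeat line does not exist Python raises IndexError: excluded by Pre_, the port returns [].
-- structural recursion on `fuel`; started with `script.length` fuel, enough since `curr`
-- grows by at least 1 per iteration (the guard `curr < script.length` fails before fuel runs out).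
def pvA_loop (script : List String) (fuel : Nat) (vars : PySem.Dict String Int) (stack : List Int)
    (curr : Nat) : List (String × Int) :=
  match fuel with
  | 0 => vars.items
  | fuel + 1 =>
    if h : curr < script.length then
      let line := script[curr]
      if line = "}" then
        match stack with
        | [] => []            -- unreachable: the loop returns {} as soon as the stack empties
        | _ :: rest =>
          if rest.length = 0 then [] else pvA_loop script fuel vars rest (curr + 1)
      else if PySem.Str.startswith line "repeat " then
        match PySem.Int.ofStr? (PySem.Str.slice line (some 7) none) with
        | none => []
        | some rep =>
          if h2 : curr + 1 < script.length then
            if script[curr + 1] ≠ "{" then [] else pvA_loop script fuel vars (rep :: stack) (curr + 2)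
          else []               -- IndexError in Python; outside Pre_
      else if PySem.Str.slice line (some (-2)) none = "++" then
        let name := PySem.Str.slice line none (some (-2))
        let vars1 := if vars.contains name then vars else vars.insert name 0
        let vars2 := vars1.modify name 0 (· + pvProd stack)
        if vars2.getD name 0 > 1000000 then [] else pvA_loop script fuel vars2 stack (curr + 1)
      else []
    else vars.items

def parse_maybe_uwpl (script : List String) : List (String × Int) :=
  pvA_loop script script.length PySem.Dict.empty [1] 0

-- ===== PORT B =====
-- B's for-loop over the lines: `prods` is the stack of cumulative products (head = top),
-- `expect` the expect_brace flag.
def pvB_loop : List String → PySem.Dict String Int → List Int → Bool → List (String × Int)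
  | [], vars, _, _ => vars.items
  | line :: rest, vars, prods, expect =>
    if expect then
      if line ≠ "{" then [] else pvB_loop rest vars prods false
    else if line = "}" then
      let prods' := prods.tail
      if prods'.isEmpty then [] else pvB_loop rest vars prods' false
    else if PySem.Str.startswith line "repeat " then
      match PySem.Int.ofStr? (PySem.Str.slice line (some 7) none) with
      | none => []
      | some rep => pvB_loop rest vars ((prods.headD 1 * rep) :: prods) true
    else if PySem.Str.endswith line "++" then
      let name := PySem.Str.slice line none (some (-2))
      let v := vars.getD name 0 + prods.headD 1
      let vars' := vars.insert name v
      if v > 1000000 then [] else pvB_loop rest vars' prods false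
    else []

def parse_maybe_uwpl_alt (script : List String) : List (String × Int) :=
  pvB_loop script PySem.Dict.empty [1] false

-- ===== PRECONDITION & SPEC =====
-- a line "repeat N" with a parseable N
def pvRepeatLine (line : String) : Bool :=
  PySem.Str.startswith line "repeat " && (PySem.Int.ofStr? (PySem.Str.slice line (some 7) none)).isSome

-- Pre_ excludes scripts whose last line is a parseable repeat header: when A's loop reaches such
-- a line it looks for the following "{" at index curr+1, past the end, and raises IndexError.
-- (On some such scripts A still returns the empty dict, because an earlier line, e.g. a stray "}",
-- already aborted the parse; those are excluded too.)
def Pre_parse_maybe_uwpl (script : List String) : Prop :=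
  pvRepeatLine (script.getLastD "") = false
instance (script : List String) : Decidable (Pre_parse_maybe_uwpl script) := by
  unfold Pre_parse_maybe_uwpl; infer_instance

def pvWitness_parse_maybe_uwpl : List String := ["repeat 3", "{", "x++", "}", "x++"]

def Spec_parse_maybe_uwpl (script : List String) (out : List (String × Int)) : Prop :=
  out = parse_maybe_uwpl_alt script
instance (script : List String) (out : List (String × Int)) : Decidable (Spec_parse_maybe_uwpl script out) := by
  unfold Spec_parse_maybe_uwpl; infer_instance

-- ===== CLAIM (what is proved, stated in full; the proofs are below) =====
def Claim_equal_parse_maybe_uwpl : Prop := ∀ (script : List String), Dom_parse_maybe_uwpl script → Pre_parse_maybe_uwpl script → Spec_parse_maybe_uwpl script (parse_maybe_uwpl script)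

-- ===== LEMMAS AND PROOFS =====

-- the cumulative-product stack B maintains, as a function of A's stack
def pvSuffixProds : List Int → List Int
  | [] => []
  | a :: s => ((pvSuffixProds s).headD 1 * a) :: pvSuffixProds s

theorem pvProd_eq (l : List Int) : pvProd l = l.prod := (List.prod_eq_foldl).symm

theorem pvSuffixProds_headD (s : List Int) : (pvSuffixProds s).headD 1 = pvProd s := by
  induction s with
  | nil => simp [pvSuffixProds, pvProd]
  | cons a s ih => simp [pvSuffixProds, pvProd_eq] at *; rw [ih]; ring

theorem pvSuffixProds_eq_nil_iff (s : List Int) : pvSuffixProds s = [] ↔ s = [] := by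
  cases s <;> simp [pvSuffixProds]

theorem pvEndswith_iff (line : String) :
    (PySem.Str.slice line (some (-2)) none = "++") ↔ PySem.Str.endswith line "++" = true := by
  rw [show PySem.Str.endswith line "++" = PySem.Chars.endswith line.toList "++".toList from by simp,
      PySem.Chars.endswith_iff]
  constructor
  · intro h
    have := congrArg String.toList h
    simp [PySem.Str.toList_slice] at this
    rw [PySem.List.slice_from_neg_ofNat line.toList 2 (by omega)] at this
    have h2 : ("++".toList : List Char) = ['+', '+'] := rfl
    rw [h2, ← this]; exact List.drop_suffix _ _
  · rintro ⟨t, ht⟩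
    have : line.toList.drop (line.toList.length - 2) = "++".toList := by
      rw [← ht]; simp
    apply String.ext
    simp [PySem.Str.toList_slice]
    rw [PySem.List.slice_from_neg_ofNat line.toList 2 (by omega)]
    exact this

theorem pvDict_eq_of_items (a b : PySem.Dict String Int) (h : a.items = b.items) : a = b := by
  cases a; cases b; simpa using h

theorem pvInsert_insert (d : PySem.Dict String Int) (k : String) (v w : Int) :
    (d.insert k v).insert k w = d.insert k w := by
  have h1 : (d.insert k v).contains k := PySem.Dict.contains_insert_self d k v
  apply pvDict_eq_of_items
  rw [PySem.Dict.items_insert_of_contains _ w h1]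
  by_cases hc : d.contains k
  · rw [PySem.Dict.items_insert_of_contains _ v hc,
        PySem.Dict.items_insert_of_contains _ w hc, List.map_map]
    apply List.map_congr_left
    intro p _
    by_cases hp : p.1 = k <;> simp [hp]
  · rw [PySem.Dict.items_insert_of_not_contains _ v (by simpa using hc),
        PySem.Dict.items_insert_of_not_contains _ w (by simpa using hc)]
    have hmap : ∀ p ∈ d.items, (if p.1 = k then ((k, w) : String × Int) else p) = p := by
      intro p hp
      have hne : ¬ p.1 = k := by
        intro hx
        exact hc (List.any_eq_true.mpr ⟨p, hp, by simpa using hx⟩)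
      simp [hne]
    have hm := List.map_congr_left hmap
    simp only [List.map_id'] at hm
    simp [hm]

theorem pvVars_step (d : PySem.Dict String Int) (k : String) (c : Int) :
    (if d.contains k then d else d.insert k 0).modify k 0 (· + c) = d.insert k (d.getD k 0 + c) := by
  by_cases hc : d.contains k
  · simp [hc, PySem.Dict.modify]
  · simp only [hc, if_false, Bool.false_eq_true, PySem.Dict.modify,
      PySem.Dict.getD_insert_self, pvInsert_insert]
    rw [PySem.Dict.getD_of_not_contains d 0 (by simpa using hc)]

theorem pvLoop_eq (script : List String) (hpre : Pre_parse_maybe_uwpl script) :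
    ∀ fuel curr (vars : PySem.Dict String Int) stack,
      script.length - curr ≤ fuel → stack ≠ [] →
      pvA_loop script fuel vars stack curr = pvB_loop (script.drop curr) vars (pvSuffixProds stack) false := by
  intro fuel
  induction fuel with
  | zero =>
    intro curr vars stack hle _
    have hcurr : script.length ≤ curr := by omega
    rw [List.drop_eq_nil_of_le hcurr]
    simp [pvA_loop, pvB_loop]
  | succ fuel ih =>
    intro curr vars stack hle hstack
    by_cases h : curr < script.length
    · rw [List.drop_eq_getElem_cons h]
      rw [pvA_loop.eq_def]
      simp only [h, dif_pos]
      by_cases hb : script[curr] = "}"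
      · obtain ⟨a, rest, rfl⟩ : ∃ a rest, stack = a :: rest := by
          cases stack with
          | nil => exact absurd rfl hstack
          | cons a rest => exact ⟨a, rest, rfl⟩
        rw [pvB_loop]
        by_cases hr0 : rest = []
        · subst hr0; simp [hb, pvSuffixProds]
        · have h1 := ih (curr + 1) vars rest (by omega) hr0
          simp [hb, hr0, pvSuffixProds, pvSuffixProds_eq_nil_iff, h1]
      · by_cases hrep : PySem.Chars.startswith script[curr].toList ['r', 'e', 'p', 'e', 'a', 't', ' '] = true
        · cases hparse : PySem.Int.ofStr? (PySem.Str.slice script[curr] (some 7) none) with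
          | none => rw [pvB_loop]; simp [hb, hrep, hparse]
          | some rep =>
            by_cases h2 : curr + 1 < script.length
            · rw [pvB_loop]
              simp only [hb, hparse, h2, dif_pos, if_false, Bool.false_eq_true]
              rw [List.drop_eq_getElem_cons h2, pvB_loop]
              by_cases hbrace : script[curr + 1] = "{"
              · have h3 := ih (curr + 2) vars (rep :: stack) (by omega) (by simp)
                simp only [pvSuffixProds] at h3
                simp [hrep, hbrace, h3]
              · simp [hrep, hbrace]
            · exfalso
              have hcurr : curr = script.length - 1 := by omega
              subst hcurr
              have hlast : script.getLastD "" = script[script.length - 1] := by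
                rw [List.getLastD_eq_getLast?, List.getLast?_eq_getElem?,
                  List.getElem?_eq_getElem (by omega : script.length - 1 < script.length)]
                rfl
              rw [Pre_parse_maybe_uwpl, hlast, pvRepeatLine] at hpre
              simp [hrep, hparse] at hpre
        · by_cases hpp : PySem.Str.slice script[curr] (some (-2)) none = "++"
          · have hew : PySem.Chars.endswith script[curr].toList ['+', '+'] = true := by
              have := (pvEndswith_iff _).mp hpp; simpa using this
            have hps : (pvSuffixProds stack).head?.getD 1 = pvProd stack := by
              simpa using pvSuffixProds_headD stack
            rw [pvB_loop]
            by_cases hv : vars.getD (PySem.Str.slice script[curr] none (some (-2))) 0 + pvProd stack > 1000000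
            · simp [hv, hb, hrep, hpp, hew, pvVars_step, hps]
            · have h4 := ih (curr + 1)
                (vars.insert (PySem.Str.slice script[curr] none (some (-2)))
                  (vars.getD (PySem.Str.slice script[curr] none (some (-2))) 0 + pvProd stack))
                stack (by omega) hstack
              simp [hv, hb, hrep, hpp, hew, pvVars_step, hps, h4]
          · have hew : ¬ PySem.Chars.endswith script[curr].toList ['+', '+'] = true := by
              intro hx
              exact hpp ((pvEndswith_iff _).mpr (by simpa using hx))
            rw [pvB_loop]
            simp [hb, hrep, hpp, hew]
    · have hcurr : script.length ≤ curr := by omega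
      rw [List.drop_eq_nil_of_le hcurr]
      simp [pvA_loop, pvB_loop, Nat.not_lt.mpr hcurr]

-- ===== VERDICT (by name: the statement is the Claim_ definition above) =====
theorem parse_maybe_uwpl_spec : Claim_equal_parse_maybe_uwpl := by
  intro script _ hpre
  unfold Spec_parse_maybe_uwpl parse_maybe_uwpl parse_maybe_uwpl_alt
  have h := pvLoop_eq script hpre script.length 0 PySem.Dict.empty [1] (by omega) (by simp)
  simpa [pvSuffixProds] using h
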